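-- pv_equiv track=rewrite | github.com/riceboypeter/coding-daily | leetcode/8 string to int.py | use
-- ===== SOURCE A (Python) =====
-- def use(s):
--     accepted = ['-','+','0123456789']
--     result = ""
--     for i in range(0,len(s)):
--         if s[i] == " ":
--             continue
--         elif result == "" and s[i] in accepted:
--             result += s[i]
--         elif s[i] in accepted[2]:
--             result += s[i]
--         else:
--             break
--
--     if result == "":
--         return 0
--     elif result == "-" or result == "+":
--         return 0
--
--     if result[0] == '-':
--         result = result[1:]
--         result = int(result) * -1
--     elif result[0] == '+':
--         result = int(result[1:])
--
--     if int(result) > 2**31-1: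
--         return 2**31-1
--     elif int(result) < -2**31:
--         return -2**31
--     else:
--         return int(result)
-- ===== SOURCE B (Python) =====
-- def use(s):
--     t = s.replace(' ', '')
--     sign, body = 1, t
--     if t[:1] == '-':
--         sign, body = -1, t[1:]
--     elif t[:1] == '+':
--         body = t[1:]
--     end = next((i for i, c in enumerate(body) if not ('0' <= c <= '9')), len(body))
--     digits = body[:end]
--     if not digits:
--         return 0
--     return min(max(sign * int(digits), -2**31), 2**31 - 1)
-- ===== Notes on version B (the rewrite author's own statement) =====
-- stated objective: idiomatic
-- what changed: A's per-character state machine with a result accumulator and break is replaced by preprocessing: strip all spaces, split off one optional sign, take the leading digit run, parse it once with int(), and clamp with min/max.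
import Mathlib
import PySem

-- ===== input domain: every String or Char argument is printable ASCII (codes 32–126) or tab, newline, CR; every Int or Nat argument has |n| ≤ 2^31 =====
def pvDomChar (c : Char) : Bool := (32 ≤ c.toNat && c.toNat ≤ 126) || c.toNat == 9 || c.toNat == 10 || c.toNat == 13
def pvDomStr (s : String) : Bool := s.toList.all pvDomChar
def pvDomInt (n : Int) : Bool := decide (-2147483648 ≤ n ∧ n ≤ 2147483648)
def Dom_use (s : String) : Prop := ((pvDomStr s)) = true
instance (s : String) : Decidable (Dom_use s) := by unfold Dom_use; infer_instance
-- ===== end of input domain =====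

-- B replaces A's character-by-character state machine with "strip spaces, split off an optional
-- sign, take the digit prefix, parse once, clamp" — simpler/more idiomatic, same results.

-- ===== PORT A =====
-- accepted = ['-','+','0123456789']
def useAccepted : List String := ["-", "+", "0123456789"]
-- accepted[2], as the list of its characters (s[i] in accepted[2] is membership in these)
def useDigits : List Char := "0123456789".toList

-- the for-loop over s with `break` (the `result` accumulator is the second argument)
def useLoop : List Char → List Char → List Char
  | [], result => result
  | c :: rest, result =>
    if c = ' ' then useLoop rest result
    else if result = [] ∧ useAccepted.contains (String.ofList [c]) then useLoop rest (result ++ [c])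
    else if useDigits.contains c then useLoop rest (result ++ [c])
    else result

def use (s : String) : Int :=
  let result := useLoop s.toList []
  if result = [] then 0
  else if result = ['-'] ∨ result = ['+'] then 0
  else
    -- int() never raises here (past the guards, result is an optional sign followed by ≥1
    -- digit), so `.getD 0` is exact
    let v : Int :=
      if PySem.List.pyGet? result 0 = some '-' then
        (PySem.Int.ofChars? (PySem.List.slice result (some 1) none)).getD 0 * -1
      else if PySem.List.pyGet? result 0 = some '+' then
        (PySem.Int.ofChars? (PySem.List.slice result (some 1) none)).getD 0
      else (PySem.Int.ofChars? result).getD 0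
    if v > 2 ^ 31 - 1 then 2 ^ 31 - 1
    else if v < -(2 ^ 31) then -(2 ^ 31)
    else v

-- ===== PORT B =====
def use_alt (s : String) : Int :=
  let t := PySem.Chars.replace s.toList [' '] []     -- s.replace(' ', '')
  let sb : Int × List Char :=                        -- (sign, body)
    if t.take 1 = ['-'] then (-1, t.drop 1)
    else if t.take 1 = ['+'] then (1, t.drop 1)
    else (1, t)
  -- end = next((i for i, c in enumerate(body) if not ('0' <= c <= '9')), len(body))
  let endIdx : Nat :=
    (sb.2.findIdx? (fun c => !(decide ('0' ≤ c) && decide (c ≤ '9')))).getD sb.2.length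
  let digits := sb.2.take endIdx
  if digits = [] then 0
  else min (max (sb.1 * (PySem.Int.ofChars? digits).getD 0) (-(2 ^ 31))) (2 ^ 31 - 1)

-- ===== PRECONDITION & SPEC =====
def Spec_use (s : String) (out : Int) : Prop := out = use_alt s
instance (s : String) (out : Int) : Decidable (Spec_use s out) := by unfold Spec_use; infer_instance

-- ===== CLAIM (what is proved, stated in full; the proofs are below) =====
def Claim_equal_use : Prop := ∀ (s : String), Dom_use s → Spec_use s (use s)

-- ===== LEMMAS AND PROOFS =====

-- Python's `'0' <= c <= '9'` as a Bool predicate (B's digit test)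
def pvIsDig (c : Char) : Bool := decide ('0' ≤ c) && decide (c ≤ '9')

theorem pv_digits_eq : useDigits = ['0','1','2','3','4','5','6','7','8','9'] := by decide

-- A's digit test agrees with B's
theorem pv_contains_digits (c : Char) : useDigits.contains c = pvIsDig c := by
  rw [pv_digits_eq, Bool.eq_iff_iff]
  unfold pvIsDig
  have hext : ∀ d : Char, c.toNat = d.toNat → c = d := fun d hd => Char.ext (UInt32.ext_iff.mpr hd)
  constructor
  · intro h
    simp at h
    rcases h with h|h|h|h|h|h|h|h|h|h <;> subst h <;> decide
  · intro h
    simp at h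
    obtain ⟨h1, h2⟩ := h
    rw [Char.le_def, UInt32.le_iff_toNat_le] at h1 h2
    have : c = '0' ∨ c = '1' ∨ c = '2' ∨ c = '3' ∨ c = '4' ∨ c = '5' ∨ c = '6' ∨ c = '7' ∨
        c = '8' ∨ c = '9' := by
      have hn : c.toNat = 48 ∨ c.toNat = 49 ∨ c.toNat = 50 ∨ c.toNat = 51 ∨ c.toNat = 52 ∨
          c.toNat = 53 ∨ c.toNat = 54 ∨ c.toNat = 55 ∨ c.toNat = 56 ∨ c.toNat = 57 := by
        change (48 : Nat) ≤ c.toNat at h1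
        change c.toNat ≤ (57 : Nat) at h2
        omega
      rcases hn with h|h|h|h|h|h|h|h|h|h
      · exact Or.inl (hext '0' (by rw [h]; rfl))
      · exact Or.inr (Or.inl (hext '1' (by rw [h]; rfl)))
      · exact Or.inr (Or.inr (Or.inl (hext '2' (by rw [h]; rfl))))
      · exact Or.inr (Or.inr (Or.inr (Or.inl (hext '3' (by rw [h]; rfl)))))
      · exact Or.inr (Or.inr (Or.inr (Or.inr (Or.inl (hext '4' (by rw [h]; rfl))))))
      · exact Or.inr (Or.inr (Or.inr (Or.inr (Or.inr (Or.inl (hext '5' (by rw [h]; rfl)))))))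
      · exact Or.inr (Or.inr (Or.inr (Or.inr (Or.inr (Or.inr (Or.inl (hext '6' (by rw [h]; rfl))))))))
      · exact Or.inr (Or.inr (Or.inr (Or.inr (Or.inr (Or.inr (Or.inr (Or.inl (hext '7' (by rw [h]; rfl)))))))))
      · exact Or.inr (Or.inr (Or.inr (Or.inr (Or.inr (Or.inr (Or.inr (Or.inr (Or.inl (hext '8' (by rw [h]; rfl))))))))))
      · exact Or.inr (Or.inr (Or.inr (Or.inr (Or.inr (Or.inr (Or.inr (Or.inr (Or.inr (hext '9' (by rw [h]; rfl))))))))))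
    rcases this with h|h|h|h|h|h|h|h|h|h <;> subst h <;> decide

-- membership of the one-character string in accepted = ['-','+','0123456789']
theorem pv_contains_accepted (c : Char) :
    (useAccepted.contains (String.ofList [c])) = (c == '-' || c == '+') := by
  have h1 : (String.ofList [c] = "-") ↔ c = '-' := by
    rw [show ("-" : String) = String.ofList ['-'] from rfl, String.ofList_inj]; simp
  have h2 : (String.ofList [c] = "+") ↔ c = '+' := by
    rw [show ("+" : String) = String.ofList ['+'] from rfl, String.ofList_inj]; simp
  have h3 : (String.ofList [c] = "0123456789") ↔ False := by
    rw [show ("0123456789" : String) = String.ofList ("0123456789".toList) from rfl,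
      String.ofList_inj]
    simp
  simp only [useAccepted, List.contains, List.elem_eq_mem, List.mem_cons, List.not_mem_nil,
    or_false]
  simp only [h1, h2, h3]
  by_cases ha : c = '-' <;> by_cases hb : c = '+' <;> simp [ha, hb]

theorem pv_accepted_iff (c : Char) :
    (useAccepted.contains (String.ofList [c]) = true) ↔ (c = '-' ∨ c = '+') := by
  rw [pv_contains_accepted]; simp

-- str.replace(' ', '') is the space filter
theorem pv_replace_go_filter (fuel : Nat) (l acc : List Char) (h : l.length ≤ fuel) :
    PySem.Chars.replace.go [' '] [] fuel l acc = acc.reverse ++ l.filter (fun c => !(c == ' ')) := by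
  induction fuel generalizing l acc with
  | zero => match l with | [] => simp [PySem.Chars.replace.go] | c :: t => simp at h
  | succ n ih =>
    match l with
    | [] => simp [PySem.Chars.replace.go]
    | c :: t =>
      have hlt : t.length ≤ n := by simp at h; omega
      by_cases hc : c = ' '
      · subst hc
        have hpre : [' '].isPrefixOf (' ' :: t) = true := by simp [List.isPrefixOf]
        simp only [PySem.Chars.replace.go, hpre, if_true]
        rw [show (List.drop [' '].length (' ' :: t)) = t from rfl,
          show ([] : List Char).reverse ++ acc = acc from rfl, ih t acc hlt]
        simp
      · have hpre : [' '].isPrefixOf (c :: t) = false := by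
          simp [List.isPrefixOf]; exact fun h' => absurd h'.symm hc
        simp only [PySem.Chars.replace.go, hpre, Bool.false_eq_true, if_false]
        rw [ih t (c :: acc) hlt]
        simp [hc]

theorem pv_replace_filter (cs : List Char) :
    PySem.Chars.replace cs [' '] [] = cs.filter (fun c => !(c == ' ')) := by
  simpa using pv_replace_go_filter cs.length cs [] le_rfl

-- B's `take(first index of a non-digit)` is takeWhile
theorem pv_take_findIdx (l : List Char) (p : Char → Bool) :
    l.take ((l.findIdx? (fun c => !p c)).getD l.length) = l.takeWhile p := by
  induction l with
  | nil => rfl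
  | cons c rest ih =>
    by_cases h : p c
    · simp only [List.findIdx?_cons, h, Bool.not_true, List.takeWhile_cons_of_pos]
      cases hf : rest.findIdx? (fun c => !p c) <;> simp [hf] at ih ⊢ <;> simpa [hf] using ih
    · simp [List.findIdx?_cons, h]

theorem pv_take_findIdx' (l : List Char) :
    l.take ((l.findIdx? (fun c => !(decide ('0' ≤ c) && decide (c ≤ '9')))).getD l.length) =
      l.takeWhile pvIsDig := pv_take_findIdx l pvIsDig

-- what A's loop appends once result is nonempty (digit mode): digits, skipping spaces, until break
def pvDpf : List Char → List Char
  | [] => []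
  | c :: rest =>
    if c = ' ' then pvDpf rest
    else if useDigits.contains c then c :: pvDpf rest
    else []

theorem pv_useLoop_digitMode (cs : List Char) (r : List Char) (hr : r ≠ []) :
    useLoop cs r = r ++ pvDpf cs := by
  induction cs generalizing r with
  | nil => simp [useLoop, pvDpf]
  | cons c rest ih =>
    simp only [useLoop, pvDpf]
    by_cases hsp : c = ' '
    · rw [if_pos hsp, if_pos hsp, ih r hr]
    · rw [if_neg hsp, if_neg hsp, if_neg (fun h => hr h.1)]
      by_cases hd : useDigits.contains c = true
      · rw [if_pos hd, if_pos hd, ih (r ++ [c]) (by simp), List.append_assoc]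
        rfl
      · rw [if_neg hd, if_neg hd, List.append_nil]

theorem pv_dpf_eq (cs : List Char) :
    pvDpf cs = (cs.filter (fun c => !(c == ' '))).takeWhile pvIsDig := by
  induction cs with
  | nil => rfl
  | cons c rest ih =>
    by_cases hsp : c = ' '
    · subst hsp; simpa [pvDpf] using ih
    · by_cases hd : useDigits.contains c = true
      · have hd' : pvIsDig c = true := by rw [← pv_contains_digits]; exact hd
        have hmem : c ∈ useDigits := by simpa using hd
        simp [pvDpf, hsp, hmem, hd', ih]
      · have hd' : pvIsDig c = false := by rw [← pv_contains_digits]; simpa using hd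
        have hmem : c ∉ useDigits := by simpa using hd
        simp [pvDpf, hsp, hmem, hd']

-- what A's loop produces from the empty result, as a function of the space-stripped input
def pvSdp (t : List Char) : List Char :=
  match t with
  | [] => []
  | c :: rest => if c = '-' ∨ c = '+' ∨ pvIsDig c = true then c :: rest.takeWhile pvIsDig else []

theorem pv_useLoop_empty (cs : List Char) :
    useLoop cs [] = pvSdp (cs.filter (fun c => !(c == ' '))) := by
  induction cs with
  | nil => rfl
  | cons c rest ih =>
    simp only [useLoop]
    by_cases hsp : c = ' '
    · rw [if_pos hsp, ih]
      congr 1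
      simp [hsp]
    · rw [if_neg hsp]
      have hfilt : (c :: rest).filter (fun c => !(c == ' ')) =
          c :: rest.filter (fun c => !(c == ' ')) := by simp [hsp]
      rw [hfilt]
      by_cases hsign : c = '-' ∨ c = '+'
      · have hacc : useAccepted.contains (String.ofList [c]) = true := (pv_accepted_iff c).mpr hsign
        have hmem : String.ofList [c] ∈ useAccepted := by simpa using hacc
        rw [if_pos (by simp [hmem]), List.nil_append,
          pv_useLoop_digitMode rest [c] (by simp), pv_dpf_eq]
        simp only [pvSdp]
        rw [if_pos (by tauto)]
        rfl
      · have hacc : ¬(useAccepted.contains (String.ofList [c]) = true) :=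
          fun h => hsign ((pv_accepted_iff c).mp h)
        rw [if_neg (fun h => hacc h.2)]
        by_cases hd : useDigits.contains c = true
        · have hd' : pvIsDig c = true := by rw [← pv_contains_digits]; exact hd
          rw [if_pos hd, List.nil_append,
            pv_useLoop_digitMode rest [c] (by simp), pv_dpf_eq]
          simp only [pvSdp]
          rw [if_pos (Or.inr (Or.inr hd'))]
          rfl
        · have hd' : ¬ pvIsDig c = true := fun h => hd (by rw [pv_contains_digits]; exact h)
          rw [if_neg hd]
          simp only [pvSdp]
          rw [if_neg (by tauto)]

theorem pv_clamp (v : Int) :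
    (if v > 2 ^ 31 - 1 then (2 ^ 31 - 1 : Int) else if v < -(2 ^ 31) then -(2 ^ 31) else v) =
      min (max v (-(2 ^ 31))) (2 ^ 31 - 1) := by
  split_ifs <;> omega

theorem pv_main (s : String) : use s = use_alt s := by
  simp only [use, use_alt, pv_useLoop_empty, pv_replace_filter, pv_take_findIdx']
  cases hfilt : s.toList.filter (fun c => !(c == ' ')) with
  | nil => simp [pvSdp]
  | cons c rest =>
    by_cases hneg : c = '-'
    · subst hneg
      have hsdp : pvSdp ('-' :: rest) = '-' :: rest.takeWhile pvIsDig := by simp [pvSdp]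
      rw [hsdp, if_pos (show ('-' :: rest).take 1 = ['-'] by rfl)]
      cases htw : rest.takeWhile pvIsDig with
      | nil =>
        rw [List.drop_one, List.tail_cons, htw]
        simp
      | cons d ds =>
        rw [List.drop_one, List.tail_cons, htw,
          if_neg (show ¬('-' :: d :: ds : List Char) = [] by simp),
          if_neg (show ¬(('-' :: d :: ds : List Char) = ['-'] ∨
            ('-' :: d :: ds : List Char) = ['+']) by simp),
          if_pos (show PySem.List.pyGet? ('-' :: d :: ds : List Char) 0 = some '-' by
            simp [pysem]),
          PySem.List.slice_from_one, List.tail_cons,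
          if_neg (show ¬(d :: ds : List Char) = [] by simp),
          pv_clamp, show ((-1 : Int), (rest : List Char)).1 = -1 from rfl]
        omega
    · by_cases hpos : c = '+'
      · subst hpos
        have hsdp : pvSdp ('+' :: rest) = '+' :: rest.takeWhile pvIsDig := by simp [pvSdp]
        rw [hsdp, if_neg (show ¬('+' :: rest).take 1 = ['-'] by simp),
          if_pos (show ('+' :: rest).take 1 = ['+'] by rfl)]
        cases htw : rest.takeWhile pvIsDig with
        | nil =>
          rw [List.drop_one, List.tail_cons, htw]
          simp
        | cons d ds =>
          rw [List.drop_one, List.tail_cons, htw,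
            if_neg (show ¬('+' :: d :: ds : List Char) = [] by simp),
            if_neg (show ¬(('+' :: d :: ds : List Char) = ['-'] ∨
              ('+' :: d :: ds : List Char) = ['+']) by simp),
            if_neg (show ¬(PySem.List.pyGet? ('+' :: d :: ds : List Char) 0 = some '-') by
              simp [pysem]),
            if_pos (show PySem.List.pyGet? ('+' :: d :: ds : List Char) 0 = some '+' by
              simp [pysem]),
            PySem.List.slice_from_one, List.tail_cons,
            if_neg (show ¬(d :: ds : List Char) = [] by simp),
            pv_clamp, show ((1 : Int), (rest : List Char)).1 = 1 from rfl, one_mul]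
      · by_cases hd : pvIsDig c = true
        · have hsdp : pvSdp (c :: rest) = c :: rest.takeWhile pvIsDig := by simp [pvSdp, hd]
          rw [hsdp,
            if_neg (show ¬(c :: rest).take 1 = ['-'] by simp [hneg]),
            if_neg (show ¬(c :: rest).take 1 = ['+'] by simp [hpos]),
            show ((1 : Int), c :: rest).2 = c :: rest from rfl,
            List.takeWhile_cons_of_pos hd,
            if_neg (show ¬(c :: rest.takeWhile pvIsDig) = [] by simp),
            if_neg (show ¬((c :: rest.takeWhile pvIsDig) = ['-'] ∨
              (c :: rest.takeWhile pvIsDig) = ['+']) by simp [hneg, hpos]),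
            if_neg (show ¬(PySem.List.pyGet? (c :: rest.takeWhile pvIsDig) 0 = some '-') by
              simp [pysem, hneg]),
            if_neg (show ¬(PySem.List.pyGet? (c :: rest.takeWhile pvIsDig) 0 = some '+') by
              simp [pysem, hpos]),
            pv_clamp, show ((1 : Int), c :: rest).1 = 1 from rfl, one_mul,
            if_neg (show ¬(c :: rest.takeWhile pvIsDig) = [] by simp)]
        · have hsdp : pvSdp (c :: rest) = [] := by simp [pvSdp, hneg, hpos, hd]
          rw [hsdp, if_pos rfl,
            if_neg (show ¬(c :: rest).take 1 = ['-'] by simp [hneg]),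
            if_neg (show ¬(c :: rest).take 1 = ['+'] by simp [hpos]),
            show ((1 : Int), c :: rest).2 = c :: rest from rfl,
            List.takeWhile_cons_of_neg (by simpa using hd), if_pos rfl]

-- ===== VERDICT (by name: the statement is the Claim_ definition above) =====
theorem use_spec : Claim_equal_use := by
  intro s _
  unfold Spec_use
  exact pv_main s
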